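-- pv_equiv track=rewrite | github.com/psytz123/beverly_knits_erp_v2 | src/rules/yarn_substitution.py | _similar_color
-- ===== SOURCE A (Python) =====
-- def _similar_color(color1: str, color2: str) -> bool:
--     """Check if colors are similar.
--
--     Args:
--         color1: First color
--         color2: Second color
--
--     Returns:
--         True if colors are similar
--     """
--     # Simple color family matching
--     color_families = {
--         'red': ['red', 'crimson', 'scarlet', 'burgundy'],
--         'blue': ['blue', 'navy', 'azure', 'cobalt'],
--         'green': ['green', 'olive', 'emerald', 'lime'],
--         'black': ['black', 'charcoal', 'ebony'],
--         'white': ['white', 'ivory', 'cream'],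
--         'gray': ['gray', 'grey', 'silver', 'ash']
--     }
--
--     color1_lower = str(color1).lower()
--     color2_lower = str(color2).lower()
--
--     for family, colors in color_families.items():
--         if color1_lower in colors and color2_lower in colors:
--             return True
--
--     return False
-- ===== SOURCE B (Python) =====
-- _COLOR_FAMILIES = {
--     'red': ['red', 'crimson', 'scarlet', 'burgundy'],
--     'blue': ['blue', 'navy', 'azure', 'cobalt'],
--     'green': ['green', 'olive', 'emerald', 'lime'],
--     'black': ['black', 'charcoal', 'ebony'],
--     'white': ['white', 'ivory', 'cream'],
--     'gray': ['gray', 'grey', 'silver', 'ash']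
-- }
--
-- # inverted index: color -> family key, built once
-- _FAMILY_OF = {c: f for f, cs in _COLOR_FAMILIES.items() for c in cs}
--
--
-- def _similar_color(color1: str, color2: str) -> bool:
--     """Check if colors are similar (same color family)."""
--     family1 = _FAMILY_OF.get(str(color1).lower())
--     return family1 is not None and family1 == _FAMILY_OF.get(str(color2).lower())
-- ===== Notes on version B (the rewrite author's own statement) =====
-- stated objective: idiomatic
-- what changed: Replaces the per-call scan over all color families (membership test of both colors in each family list) with a precomputed inverted index mapping each color to its family key, so the function is two dictionary lookups and a guarded comparison.
import Mathlib
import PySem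

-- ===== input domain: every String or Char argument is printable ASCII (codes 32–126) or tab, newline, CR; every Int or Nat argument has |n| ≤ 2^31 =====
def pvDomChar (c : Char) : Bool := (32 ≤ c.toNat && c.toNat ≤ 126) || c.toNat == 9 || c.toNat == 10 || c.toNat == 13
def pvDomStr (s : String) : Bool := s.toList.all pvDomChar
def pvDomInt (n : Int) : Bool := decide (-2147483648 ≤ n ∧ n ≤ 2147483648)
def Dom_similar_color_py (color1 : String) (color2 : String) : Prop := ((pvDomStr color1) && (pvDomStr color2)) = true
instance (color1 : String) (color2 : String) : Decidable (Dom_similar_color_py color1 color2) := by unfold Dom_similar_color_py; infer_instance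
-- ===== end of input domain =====

-- B replaces A's per-call scan over every color family with one precomputed color→family
-- inverted index and two lookups (idiomatic; same observable behaviour).
set_option maxHeartbeats 1600000


-- ===== PORT A =====
def pyColorFamilies : List (String × List String) :=
  [("red", ["red", "crimson", "scarlet", "burgundy"]),
   ("blue", ["blue", "navy", "azure", "cobalt"]),
   ("green", ["green", "olive", "emerald", "lime"]),
   ("black", ["black", "charcoal", "ebony"]),
   ("white", ["white", "ivory", "cream"]),
   ("gray", ["gray", "grey", "silver", "ash"])]

-- the 'for family, colors in color_families.items(): if … return True' loop
def pyFamLoop (l1 l2 : String) : List (String × List String) → Bool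
  | [] => false
  | (_, colors) :: rest =>
      if colors.contains l1 && colors.contains l2 then true else pyFamLoop l1 l2 rest

def similar_color_py (color1 : String) (color2 : String) : Bool :=
  let color1_lower := PySem.Str.lower color1
  let color2_lower := PySem.Str.lower color2
  pyFamLoop color1_lower color2_lower pyColorFamilies

-- ===== PORT B =====
-- inverted index: {c: f for f, cs in _COLOR_FAMILIES.items() for c in cs}
def pyFamilyOf : PySem.Dict String String :=
  pyColorFamilies.foldl (fun d p => p.2.foldl (fun d c => d.insert c p.1) d) PySem.Dict.empty

def similar_color_py_alt (color1 : String) (color2 : String) : Bool :=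
  let family1 := pyFamilyOf.get? (PySem.Str.lower color1)
  family1.isSome && (family1 == pyFamilyOf.get? (PySem.Str.lower color2))

-- ===== PRECONDITION & SPEC =====
def Spec_similar_color_py (color1 : String) (color2 : String) (out : Bool) : Prop := out = similar_color_py_alt color1 color2
instance (color1 : String) (color2 : String) (out : Bool) : Decidable (Spec_similar_color_py color1 color2 out) := by unfold Spec_similar_color_py; infer_instance

-- ===== CLAIM (what is proved, stated in full; the proofs are below) =====
def Claim_equal_similar_color_py : Prop := ∀ (color1 : String) (color2 : String), Dom_similar_color_py color1 color2 → Spec_similar_color_py color1 color2 (similar_color_py color1 color2)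

-- ===== LEMMAS AND PROOFS =====

-- the index, evaluated once: the fold of insertions over fresh keys is this literal dict
theorem pyFamilyOf_eq : pyFamilyOf = PySem.Dict.mk
    [("red", "red"),
     ("crimson", "red"),
     ("scarlet", "red"),
     ("burgundy", "red"),
     ("blue", "blue"),
     ("navy", "blue"),
     ("azure", "blue"),
     ("cobalt", "blue"),
     ("green", "green"),
     ("olive", "green"),
     ("emerald", "green"),
     ("lime", "green"),
     ("black", "black"),
     ("charcoal", "black"),
     ("ebony", "black"),
     ("white", "white"),
     ("ivory", "white"),
     ("cream", "white"),
     ("gray", "gray"),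
     ("grey", "gray"),
     ("silver", "gray"),
     ("ash", "gray")] := by
  rfl

-- every lookup result is none or one of the six family keys
theorem famOf_cases (l : String) :
    pyFamilyOf.get? l = none ∨ pyFamilyOf.get? l = some "red" ∨ pyFamilyOf.get? l = some "blue" ∨
    pyFamilyOf.get? l = some "green" ∨ pyFamilyOf.get? l = some "black" ∨
    pyFamilyOf.get? l = some "white" ∨ pyFamilyOf.get? l = some "gray" := by
  cases h : pyFamilyOf.get? l with
  | none => exact Or.inl rfl
  | some v =>
    have hm := PySem.Dict.mem_items_of_get?_eq_some _ h
    rw [pyFamilyOf_eq] at hm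
    simp only [List.mem_cons, List.not_mem_nil, or_false, Prod.mk.injEq] at hm
    rcases hm with ⟨-,h2⟩|⟨-,h2⟩|⟨-,h2⟩|⟨-,h2⟩|⟨-,h2⟩|⟨-,h2⟩|⟨-,h2⟩|⟨-,h2⟩|⟨-,h2⟩|⟨-,h2⟩|⟨-,h2⟩|⟨-,h2⟩|⟨-,h2⟩|⟨-,h2⟩|⟨-,h2⟩|⟨-,h2⟩|⟨-,h2⟩|⟨-,h2⟩|⟨-,h2⟩|⟨-,h2⟩|⟨-,h2⟩|⟨-,h2⟩ <;> subst h2 <;> simp [h]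

-- membership in a family's color list coincides with the index mapping to that family

theorem fam_red (l : String) : (["red", "crimson", "scarlet", "burgundy"] : List String).contains l
    = (pyFamilyOf.get? l == some "red") := by
  by_cases hm : l ∈ (["red", "crimson", "scarlet", "burgundy"] : List String)
  · simp only [List.mem_cons, List.not_mem_nil, or_false] at hm
    rcases hm with h|h|h|h <;> subst h <;> decide
  · have hne : pyFamilyOf.get? l ≠ some "red" := by
      intro h
      have hmm := PySem.Dict.mem_items_of_get?_eq_some _ h
      rw [pyFamilyOf_eq] at hmm
      simp only [List.mem_cons, List.not_mem_nil, or_false, Prod.mk.injEq] at hmm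
      simp_all
    simp only [List.contains_eq_mem, hm, decide_false]
    cases hq : pyFamilyOf.get? l <;> simp_all

theorem fam_blue (l : String) : (["blue", "navy", "azure", "cobalt"] : List String).contains l
    = (pyFamilyOf.get? l == some "blue") := by
  by_cases hm : l ∈ (["blue", "navy", "azure", "cobalt"] : List String)
  · simp only [List.mem_cons, List.not_mem_nil, or_false] at hm
    rcases hm with h|h|h|h <;> subst h <;> decide
  · have hne : pyFamilyOf.get? l ≠ some "blue" := by
      intro h
      have hmm := PySem.Dict.mem_items_of_get?_eq_some _ h
      rw [pyFamilyOf_eq] at hmm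
      simp only [List.mem_cons, List.not_mem_nil, or_false, Prod.mk.injEq] at hmm
      simp_all
    simp only [List.contains_eq_mem, hm, decide_false]
    cases hq : pyFamilyOf.get? l <;> simp_all

theorem fam_green (l : String) : (["green", "olive", "emerald", "lime"] : List String).contains l
    = (pyFamilyOf.get? l == some "green") := by
  by_cases hm : l ∈ (["green", "olive", "emerald", "lime"] : List String)
  · simp only [List.mem_cons, List.not_mem_nil, or_false] at hm
    rcases hm with h|h|h|h <;> subst h <;> decide
  · have hne : pyFamilyOf.get? l ≠ some "green" := by
      intro h
      have hmm := PySem.Dict.mem_items_of_get?_eq_some _ h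
      rw [pyFamilyOf_eq] at hmm
      simp only [List.mem_cons, List.not_mem_nil, or_false, Prod.mk.injEq] at hmm
      simp_all
    simp only [List.contains_eq_mem, hm, decide_false]
    cases hq : pyFamilyOf.get? l <;> simp_all

theorem fam_black (l : String) : (["black", "charcoal", "ebony"] : List String).contains l
    = (pyFamilyOf.get? l == some "black") := by
  by_cases hm : l ∈ (["black", "charcoal", "ebony"] : List String)
  · simp only [List.mem_cons, List.not_mem_nil, or_false] at hm
    rcases hm with h|h|h <;> subst h <;> decide
  · have hne : pyFamilyOf.get? l ≠ some "black" := by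
      intro h
      have hmm := PySem.Dict.mem_items_of_get?_eq_some _ h
      rw [pyFamilyOf_eq] at hmm
      simp only [List.mem_cons, List.not_mem_nil, or_false, Prod.mk.injEq] at hmm
      simp_all
    simp only [List.contains_eq_mem, hm, decide_false]
    cases hq : pyFamilyOf.get? l <;> simp_all

theorem fam_white (l : String) : (["white", "ivory", "cream"] : List String).contains l
    = (pyFamilyOf.get? l == some "white") := by
  by_cases hm : l ∈ (["white", "ivory", "cream"] : List String)
  · simp only [List.mem_cons, List.not_mem_nil, or_false] at hm
    rcases hm with h|h|h <;> subst h <;> decide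
  · have hne : pyFamilyOf.get? l ≠ some "white" := by
      intro h
      have hmm := PySem.Dict.mem_items_of_get?_eq_some _ h
      rw [pyFamilyOf_eq] at hmm
      simp only [List.mem_cons, List.not_mem_nil, or_false, Prod.mk.injEq] at hmm
      simp_all
    simp only [List.contains_eq_mem, hm, decide_false]
    cases hq : pyFamilyOf.get? l <;> simp_all

theorem fam_gray (l : String) : (["gray", "grey", "silver", "ash"] : List String).contains l
    = (pyFamilyOf.get? l == some "gray") := by
  by_cases hm : l ∈ (["gray", "grey", "silver", "ash"] : List String)
  · simp only [List.mem_cons, List.not_mem_nil, or_false] at hm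
    rcases hm with h|h|h|h <;> subst h <;> decide
  · have hne : pyFamilyOf.get? l ≠ some "gray" := by
      intro h
      have hmm := PySem.Dict.mem_items_of_get?_eq_some _ h
      rw [pyFamilyOf_eq] at hmm
      simp only [List.mem_cons, List.not_mem_nil, or_false, Prod.mk.injEq] at hmm
      simp_all
    simp only [List.contains_eq_mem, hm, decide_false]
    cases hq : pyFamilyOf.get? l <;> simp_all

-- the core equality, for the (already lowered) strings
theorem core_eq (l1 l2 : String) :
    pyFamLoop l1 l2 pyColorFamilies
      = ((pyFamilyOf.get? l1).isSome && (pyFamilyOf.get? l1 == pyFamilyOf.get? l2)) := by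
  have h1 := famOf_cases l1
  have h2 := famOf_cases l2
  simp only [pyFamLoop, pyColorFamilies]
  rw [fam_red l1, fam_red l2, fam_blue l1, fam_blue l2, fam_green l1, fam_green l2,
      fam_black l1, fam_black l2, fam_white l1, fam_white l2, fam_gray l1, fam_gray l2]
  rcases h1 with h1|h1|h1|h1|h1|h1|h1 <;> rcases h2 with h2|h2|h2|h2|h2|h2|h2 <;>
    simp [h1, h2]

-- ===== VERDICT (by name: the statement is the Claim_ definition above) =====
theorem similar_color_py_spec : Claim_equal_similar_color_py := by
  intro c1 c2 _
  unfold Spec_similar_color_py similar_color_py similar_color_py_alt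
  exact core_eq _ _
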